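-- pv_equiv track=rewrite | github.com/1st-award/codetree-TILs | 240108/마라톤 중간에 택시타기 2/taking-a-taxi-in-the-middle-of-the-marathon-2.py | solution
-- ===== SOURCE A (Python) =====
-- def solution(N, cp_list):
--     distance_list = []
--     for idx in range(N-2):
--         distance = abs(cp_list[idx][0] - cp_list[idx+1][0]) + abs(cp_list[idx][1] - cp_list[idx+1][1])
--         distance_list.append(distance)
--     longest_distance_idx = distance_list.index(max(distance_list)) + 1
--     del cp_list[longest_distance_idx]
--     distance_list = []
--     for idx in range(N-2):
--         distance = abs(cp_list[idx][0] - cp_list[idx+1][0]) + abs(cp_list[idx][1] - cp_list[idx+1][1])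
--         distance_list.append(distance)
--     return sum(distance_list)
-- ===== SOURCE B (Python) =====
-- # Same result as A via arithmetic on precomputed segment distances; also performs A's in-place del.
-- def solution(N, cp_list):
--     d = [abs(cp_list[i][0] - cp_list[i+1][0]) + abs(cp_list[i][1] - cp_list[i+1][1])
--          for i in range(N - 1)]
--     head = d[:N-2]
--     p = head.index(max(head)) + 1
--     merged = abs(cp_list[p-1][0] - cp_list[p+1][0]) + abs(cp_list[p-1][1] - cp_list[p+1][1])
--     result = sum(d) - d[p-1] - d[p] + merged
--     del cp_list[p]  # preserve A's in-place removal of the dropped checkpoint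
--     return result
-- ===== Notes on version B (the rewrite author's own statement) =====
-- stated objective: faster
-- what changed: Instead of deleting the argmax checkpoint and re-walking all segments a second time, B computes the segment distances once and gets the answer arithmetically: total minus the two deleted adjacent segments plus the merged segment (the del is kept only for A's observable mutation).
import Mathlib
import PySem

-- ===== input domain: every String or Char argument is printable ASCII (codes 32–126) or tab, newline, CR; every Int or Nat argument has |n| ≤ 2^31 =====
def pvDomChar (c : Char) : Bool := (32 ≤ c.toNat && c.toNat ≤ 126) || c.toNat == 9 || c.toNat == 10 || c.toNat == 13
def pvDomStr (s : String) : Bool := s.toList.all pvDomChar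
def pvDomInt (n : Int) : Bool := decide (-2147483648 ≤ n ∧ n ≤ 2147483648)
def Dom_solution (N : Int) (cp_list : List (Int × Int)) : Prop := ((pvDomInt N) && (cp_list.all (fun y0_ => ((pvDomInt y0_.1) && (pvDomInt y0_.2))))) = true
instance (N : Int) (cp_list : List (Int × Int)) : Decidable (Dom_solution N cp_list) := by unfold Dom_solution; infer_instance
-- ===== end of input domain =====

-- B computes the segment distances once and answers arithmetically (total - two deleted segments + merged segment)
-- instead of deleting the point and re-walking all segments; both A and B delete cp_list[p] in place in Python —
-- the equivalence proved here is about the RETURN value.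

-- Manhattan distance between cp_list[i] and cp_list[j] (shared expression of both Pythons)
def pvDist (cp : List (Int × Int)) (i j : Int) : Int :=
  |(PySem.List.pyGetD cp i (0, 0)).1 - (PySem.List.pyGetD cp j (0, 0)).1| +
  |(PySem.List.pyGetD cp i (0, 0)).2 - (PySem.List.pyGetD cp j (0, 0)).2|

-- ===== PORT A =====
def solution (N : Int) (cp_list : List (Int × Int)) : Int :=
  let distance_list :=
    (PySem.List.pyRange 0 (N - 2) 1).foldl
      (fun acc idx => acc ++ [pvDist cp_list idx (idx + 1)]) []
  let m := (PySem.List.max? distance_list (fun x => x)).getD 0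
  let longest_distance_idx : Int := (((PySem.List.index? distance_list m).getD 0 : Nat) : Int) + 1
  let cp' := ((PySem.List.pop? cp_list longest_distance_idx).map (·.2)).getD cp_list
  let distance_list2 :=
    (PySem.List.pyRange 0 (N - 2) 1).foldl
      (fun acc idx => acc ++ [pvDist cp' idx (idx + 1)]) []
  distance_list2.sum

-- ===== PORT B =====
def solution_alt (N : Int) (cp_list : List (Int × Int)) : Int :=
  let d := (PySem.List.pyRange 0 (N - 1) 1).map (fun i => pvDist cp_list i (i + 1))
  let head := PySem.List.slice d none (some (N - 2))
  let m := (PySem.List.max? head (fun x => x)).getD 0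
  let p : Int := (((PySem.List.index? head m).getD 0 : Nat) : Int) + 1
  let merged := pvDist cp_list (p - 1) (p + 1)
  d.sum - PySem.List.pyGetD d (p - 1) 0 - PySem.List.pyGetD d p 0 + merged

-- ===== PRECONDITION & SPEC =====
-- Exactly the inputs on which A returns normally: N ≥ 3 (else max([]) raises ValueError)
-- and the list holds at least N points (else an IndexError fires in one of the loops).
def Pre_solution (N : Int) (cp_list : List (Int × Int)) : Prop :=
  3 ≤ N ∧ N ≤ (cp_list.length : Int)
instance (N : Int) (cp_list : List (Int × Int)) : Decidable (Pre_solution N cp_list) := by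
  unfold Pre_solution; infer_instance

def pvWitness_solution : Int × (List (Int × Int)) := (3, [(0, 0), (5, 1), (2, 2)])

def Spec_solution (N : Int) (cp_list : List (Int × Int)) (out : Int) : Prop := out = solution_alt N cp_list
instance (N : Int) (cp_list : List (Int × Int)) (out : Int) : Decidable (Spec_solution N cp_list out) := by unfold Spec_solution; infer_instance

-- ===== CLAIM (what is proved, stated in full; the proofs are below) =====
def Claim_equal_solution : Prop := ∀ (N : Int) (cp_list : List (Int × Int)), Dom_solution N cp_list → Pre_solution N cp_list → Spec_solution N cp_list (solution N cp_list)

-- ===== LEMMAS AND PROOFS =====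

theorem pvCastIdx (j : Nat) : ((j : Int) + 1) = ((j + 1 : Nat) : Int) := by push_cast; ring

theorem pvRangeNat (n : Nat) (b : Int) (hb : b = (n : Int)) :
    PySem.List.pyRange 0 b 1 = (List.range n).map (fun (j : Nat) => (j : Int)) := by
  rw [PySem.List.pyRange_one]
  simp only [sub_zero, hb, Int.toNat_natCast, zero_add]

-- 'distance_list.append(...)' loop over range(b) as a map over List.range
theorem pvLoopMap (cp : List (Int × Int)) (n : Nat) (b : Int) (hb : b = (n : Int)) :
    (PySem.List.pyRange 0 b 1).foldl (fun acc idx => acc ++ [pvDist cp idx (idx + 1)]) []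
      = (List.range n).map (fun (j : Nat) => pvDist cp (j : Int) ((j : Int) + 1)) := by
  rw [PySem.List.foldl_append_singleton_eq_map, pvRangeNat n b hb]
  simp only [List.nil_append, List.map_map]
  rfl

theorem pvDistNat (cp : List (Int × Int)) (a b : Nat) :
    pvDist cp (a : Int) (b : Int)
      = |(cp.getD a (0,0)).1 - (cp.getD b (0,0)).1| + |(cp.getD a (0,0)).2 - (cp.getD b (0,0)).2| := by
  unfold pvDist
  rw [PySem.List.pyGetD_natCast, PySem.List.pyGetD_natCast]

theorem pvEraseGet (cp : List (Int × Int)) (i j : Nat) (hi : i < cp.length) (hj : j < cp.length - 1) :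
    (cp.eraseIdx i).getD j (0,0)
      = if j < i then cp.getD j (0,0) else cp.getD (j+1) (0,0) := by
  have hlen : (cp.eraseIdx i).length = cp.length - 1 := List.length_eraseIdx_of_lt hi
  rw [List.getD_eq_getElem _ _ (by omega : j < (cp.eraseIdx i).length)]
  rw [List.getElem_eraseIdx]
  split
  · exact (List.getD_eq_getElem _ _ (by omega : j < cp.length)).symm
  · exact (List.getD_eq_getElem _ _ (by omega : j + 1 < cp.length)).symm

-- the splitting identity behind B's arithmetic: sum of the n post-deletion segments
-- versus sum of all n+1 original segments minus the two deleted ones plus the merged one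
theorem pvSumSplit (F G : Nat → Int) (M : Int) (k n : Nat) (hk : k < n)
    (h1 : ∀ j, j < k → G j = F j) (h2 : G k = M)
    (h3 : ∀ j, k < j → j < n → G j = F (j + 1)) :
    ((List.range n).map G).sum = ((List.range (n + 1)).map F).sum - F k - F (k + 1) + M := by
  have bG : ((List.range n).map G).sum = ∑ j ∈ Finset.range n, G j := rfl
  have bF : ((List.range (n+1)).map F).sum = ∑ j ∈ Finset.range (n+1), F j := rfl
  rw [bG, bF, Finset.range_eq_Ico]
  rw [← Finset.sum_Ico_consecutive G (Nat.zero_le k) hk.le]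
  rw [← Finset.sum_Ico_consecutive F (Nat.zero_le k) (by omega : k ≤ n + 1)]
  rw [Finset.sum_eq_sum_Ico_succ_bot hk G]
  rw [Finset.sum_eq_sum_Ico_succ_bot (by omega : k < n + 1) F]
  rw [Finset.sum_eq_sum_Ico_succ_bot (by omega : k + 1 < n + 1) F]
  have e1 : ∑ j ∈ Finset.Ico 0 k, G j = ∑ j ∈ Finset.Ico 0 k, F j := by
    apply Finset.sum_congr rfl
    intro j hj
    exact h1 j (Finset.mem_Ico.mp hj).2
  have e2 : ∑ j ∈ Finset.Ico (k+1) n, G j = ∑ j ∈ Finset.Ico (k+1+1) (n+1), F j := by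
    rw [← Finset.sum_Ico_add' F (k+1) n 1]
    apply Finset.sum_congr rfl
    intro j hj
    have := Finset.mem_Ico.mp hj
    exact h3 j (by omega) this.2
  rw [e1, e2, h2]
  ring

-- ===== VERDICT (by name: the statement is the Claim_ definition above) =====
theorem solution_spec : Claim_equal_solution := by
  intro N cp _ hPre
  obtain ⟨hN, hL⟩ := hPre
  unfold Spec_solution solution solution_alt
  set n : Nat := (N - 2).toNat with hn
  have hN2 : N - 2 = (n : Int) := by omega
  have hN1 : N - 1 = ((n + 1 : Nat) : Int) := by push_cast; omega
  have hn1 : 1 ≤ n := by omega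
  have hLn : n + 2 ≤ cp.length := by omega
  set F : Nat → Int := fun j => pvDist cp (j : Int) ((j : Int) + 1) with hF
  -- the shared distance list
  have hdl := pvLoopMap cp n (N - 2) hN2
  rw [← hF] at hdl
  have hd : (PySem.List.pyRange 0 (N - 1) 1).map (fun i => pvDist cp i (i + 1))
      = (List.range (n + 1)).map F := by
    rw [pvRangeNat (n + 1) (N - 1) hN1]
    simp only [List.map_map]
    rfl
  have hhead : PySem.List.slice ((List.range (n + 1)).map F) none (some (N - 2))
      = (List.range n).map F := by
    rw [hN2, PySem.List.slice_to_natCast, ← List.map_take, List.take_range]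
    simp
  -- the maximum and its first index
  have hne : (List.range n).map F ≠ [] := by
    simp only [ne_eq, List.map_eq_nil_iff, List.range_eq_nil]
    omega
  obtain ⟨m, hmax⟩ : ∃ m, PySem.List.max? ((List.range n).map F) (fun x => x) = some m := by
    cases hmx : PySem.List.max? ((List.range n).map F) (fun x => x) with
    | none => exact absurd (((PySem.List.max?_eq_none_iff _ _).mp hmx)) hne
    | some m => exact ⟨m, rfl⟩
  have hmem : m ∈ (List.range n).map F := PySem.List.max?_mem hmax
  obtain ⟨k, hidx⟩ : ∃ k, PySem.List.index? ((List.range n).map F) m = some k := by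
    cases hix : PySem.List.index? ((List.range n).map F) m with
    | none => exact absurd (((PySem.List.index?_eq_none_iff _ _).mp hix)) (by simp [hmem])
    | some k => exact ⟨k, rfl⟩
  have hk : k < n := by
    obtain ⟨pre, suf, hsplit, hlen, -⟩ := ((PySem.List.index?_eq_some_iff _ _ _).mp hidx)
    have := congrArg List.length hsplit
    simp at this
    omega
  simp only [hdl, hd, hhead, hmax, hidx, Option.getD_some]
  have hs1 : ((k : Int) + 1 - 1) = (k : Int) := by ring
  rw [hs1, pvCastIdx k, pvCastIdx (k + 1)]
  -- the deletion: pop? returns the erased list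
  rw [PySem.List.pop?_natCast cp (k + 1) (by omega : k + 1 < cp.length)]
  simp only [Option.map_some, Option.getD_some]
  rw [pvLoopMap (cp.eraseIdx (k + 1)) n (N - 2) hN2]
  -- B's two indexed distances are F k and F (k+1)
  have hlenF : ((List.range (n + 1)).map F).length = n + 1 := by simp
  have hg1 : PySem.List.pyGetD ((List.range (n + 1)).map F) (k : Int) 0 = F k := by
    rw [PySem.List.pyGetD_natCast, List.getD_eq_getElem _ _ (by omega : k < ((List.range (n + 1)).map F).length)]
    simp
  have hg2 : PySem.List.pyGetD ((List.range (n + 1)).map F) ((k + 1 : Nat) : Int) 0 = F (k + 1) := by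
    rw [PySem.List.pyGetD_natCast, List.getD_eq_getElem _ _ (by omega : k + 1 < ((List.range (n + 1)).map F).length)]
    simp
  rw [hg1, hg2]
  -- pointwise comparison of the post-deletion segments with the original ones
  apply pvSumSplit F (fun j => pvDist (cp.eraseIdx (k + 1)) (j : Int) ((j : Int) + 1))
    (pvDist cp (k : Int) ((k + 1 : Nat) + 1 : Int)) k n hk
  · intro j hj
    rw [hF]
    simp only
    rw [pvCastIdx j, pvDistNat, pvDistNat]
    rw [pvEraseGet cp (k+1) j (by omega) (by omega), pvEraseGet cp (k+1) (j+1) (by omega) (by omega)]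
    rw [if_pos (by omega), if_pos (by omega)]
  · rw [pvCastIdx k]
    have hc2 : (((k + 1 : Nat) : Int) + 1) = ((k + 2 : Nat) : Int) := by push_cast; ring
    rw [hc2, pvDistNat, pvDistNat]
    rw [pvEraseGet cp (k+1) k (by omega) (by omega), pvEraseGet cp (k+1) (k+1) (by omega) (by omega)]
    rw [if_pos (by omega), if_neg (by omega)]
  · intro j hj1 hj2
    rw [hF]
    simp only
    rw [pvCastIdx j, pvCastIdx (j+1), pvDistNat, pvDistNat]
    rw [pvEraseGet cp (k+1) j (by omega) (by omega), pvEraseGet cp (k+1) (j+1) (by omega) (by omega)]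
    rw [if_neg (by omega), if_neg (by omega)]
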